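-- pv_equiv track=rewrite | github.com/MikkelBerggreen/MScThesis | src/metrics/lossfunctions.py | similarity_matching
-- ===== SOURCE A (Python) =====
-- def similarity_matching(X, Y, t):
--     matched_pairs = []  # To store matched index pairs (i, j)
--
--     # Keep track of indices in Y that have been matched to avoid duplicates
--     matched_indices_Y = set()
--
--     # Iterate through each point in X
--     for i, x in enumerate(X):
--         if not x[3]:  # Skip if Fluctuation is False
--             continue
--
--         best_match_j = None
--         min_distance = float('inf')
--
--         # Iterate through each point in Y within the threshold range around i
--         for j in range(max(0, i - t), min(len(Y), i + t + 1)):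
--             y = Y[j]
--             if not y[3] or j in matched_indices_Y:  # Skip if Fluctuation is False or already matched
--                 continue
--
--             if x[1] == y[1]:  # Check if attributes match
--                 distance = abs(i - j)
--                 if distance < min_distance:
--                     best_match_j = j
--                     min_distance = distance
--
--         # If a match is found, add it to the matched pairs and mark the index in Y as matched
--         if best_match_j is not None:
--             matched_pairs.append((i, best_match_j))
--             matched_indices_Y.add(best_match_j)
--
--     return matched_pairs
-- ===== SOURCE B (Python) =====
-- def _nearest(Y, taken, a, i, t):
--     # Expanding ring search: try distances d = 0, 1, ..., preferring the left
--     # candidate i-d (A's tie-break), stopping at the first eligible index.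
--     n = len(Y)
--     limit = min(t, max(i, n - 1 - i))  # beyond this every candidate is out of bounds
--     d = 0
--     while d <= limit:
--         j = i - d
--         if 0 <= j < n and j not in taken and Y[j][3] and Y[j][1] == a:
--             return j
--         j = i + d
--         if d != 0 and 0 <= j < n and j not in taken and Y[j][3] and Y[j][1] == a:
--             return j
--         d += 1
--     return None
--
--
-- def similarity_matching(X, Y, t):
--     pairs = []
--     taken = set()
--     for i, x in enumerate(X):
--         if x[3]:
--             j = _nearest(Y, taken, x[1], i, t)
--             if j is not None:
--                 pairs.append((i, j))
--                 taken.add(j)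
--     return pairs
-- ===== Notes on version B (the rewrite author's own statement) =====
-- stated objective: alternative
-- what changed: B replaces A's full left-to-right window scan with a running argmin by an expanding ring search from i (distance 0,1,2,... clipped to the array bounds, left candidate first) that stops at the first eligible index, so no distance minimum is tracked.
import Mathlib
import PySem

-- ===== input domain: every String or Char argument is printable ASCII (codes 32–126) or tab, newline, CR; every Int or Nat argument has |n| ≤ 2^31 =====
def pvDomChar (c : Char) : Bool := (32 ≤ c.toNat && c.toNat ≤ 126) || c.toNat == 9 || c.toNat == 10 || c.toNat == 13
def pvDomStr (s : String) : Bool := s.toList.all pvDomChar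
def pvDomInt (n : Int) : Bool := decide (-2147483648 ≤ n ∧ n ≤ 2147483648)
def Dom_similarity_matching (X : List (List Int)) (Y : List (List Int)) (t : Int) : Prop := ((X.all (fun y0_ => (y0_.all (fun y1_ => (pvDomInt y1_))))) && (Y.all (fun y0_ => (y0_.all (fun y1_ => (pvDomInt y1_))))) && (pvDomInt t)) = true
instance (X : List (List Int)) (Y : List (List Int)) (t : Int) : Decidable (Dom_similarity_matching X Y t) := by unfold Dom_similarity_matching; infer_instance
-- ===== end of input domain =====

-- B replaces A's full window scan + running argmin by an expanding ring search from i
-- (distance 0,1,2,…, left candidate first, early exit at the first eligible index);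
-- objective: alternative algorithm of the same cost.

-- ===== PORT A =====
-- inner loop body: for j in range(...) with best_match_j / min_distance (None/Option = float('inf') start)
def innerStepA (Y : List (List Int)) (S : PySem.Set Int) (x1 i : Int)
    (bm : Option Int × Option Int) (j : Int) : Option Int × Option Int :=
  let y := PySem.List.pyGetD Y j []
  if PySem.List.pyGetD y 3 0 = 0 ∨ PySem.Set.contains S j then bm
  else if x1 = PySem.List.pyGetD y 1 0 then
    (if (match bm.2 with | none => true | some m => decide (|i - j| < m) : Bool) then
      (some j, some |i - j|)
    else bm)
  else bm

-- outer loop body of A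
def stepA (Y : List (List Int)) (t : Int)
    (st : List (Int × Int) × PySem.Set Int) (ix : Int × List Int) :
    List (Int × Int) × PySem.Set Int :=
  if PySem.List.pyGetD ix.2 3 0 = 0 then st
  else
    match ((PySem.List.pyRange (max 0 (ix.1 - t)) (min (Y.length : Int) (ix.1 + t + 1)) 1).foldl
        (innerStepA Y st.2 (PySem.List.pyGetD ix.2 1 0) ix.1) (none, none)).1 with
    | some j => (st.1 ++ [(ix.1, j)], PySem.Set.add st.2 j)
    | none => st

def similarity_matching (X : List (List Int)) (Y : List (List Int)) (t : Int) : List (Int × Int) :=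
  ((PySem.List.enumerate X).foldl (stepA Y t) ([], PySem.Set.empty)).1

-- ===== PORT B =====
-- _ok(Y, taken, a, j)
def okB (Y : List (List Int)) (taken : PySem.Set Int) (a j : Int) : Bool :=
  decide (0 ≤ j) && decide (j < (Y.length : Int)) && !(PySem.Set.contains taken j) &&
  decide (PySem.List.pyGetD (PySem.List.pyGetD Y j []) 3 0 ≠ 0) &&
  decide (PySem.List.pyGetD (PySem.List.pyGetD Y j []) 1 0 = a)

-- the while-loop of _nearest, recursing on d
def nearestAux (Y : List (List Int)) (taken : PySem.Set Int) (a i lim d : Int) : Option Int :=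
  if h : d ≤ lim then
    if okB Y taken a (i - d) then some (i - d)
    else if d ≠ 0 && okB Y taken a (i + d) then some (i + d)
    else nearestAux Y taken a i lim (d + 1)
  else none
termination_by (lim + 1 - d).toNat
decreasing_by omega

-- _nearest(Y, taken, a, i, t)
def nearestB (Y : List (List Int)) (taken : PySem.Set Int) (a i t : Int) : Option Int :=
  nearestAux Y taken a i (min t (max i ((Y.length : Int) - 1 - i))) 0

-- outer loop body of B
def stepB (Y : List (List Int)) (t : Int)
    (st : List (Int × Int) × PySem.Set Int) (ix : Int × List Int) :
    List (Int × Int) × PySem.Set Int :=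
  if PySem.List.pyGetD ix.2 3 0 ≠ 0 then
    match nearestB Y st.2 (PySem.List.pyGetD ix.2 1 0) ix.1 t with
    | some j => (st.1 ++ [(ix.1, j)], PySem.Set.add st.2 j)
    | none => st
  else st

def similarity_matching_alt (X : List (List Int)) (Y : List (List Int)) (t : Int) : List (Int × Int) :=
  ((PySem.List.enumerate X).foldl (stepB Y t) ([], PySem.Set.empty)).1

-- ===== PRECONDITION & SPEC =====
-- Pre_ excludes exactly the inputs where A raises IndexError: a row of X shorter than
-- 4 entries (A reads x[3] for every x), or a Y row shorter than 4 entries that lies in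
-- the scan window of some fluctuating row of X (A reads y[3] there).
def Pre_similarity_matching (X : List (List Int)) (Y : List (List Int)) (t : Int) : Prop :=
  (∀ x ∈ X, 4 ≤ x.length) ∧
  (∀ j : Nat, j < Y.length →
    (∃ k : Nat, k < X.length ∧ (X.getD k []).getD 3 0 ≠ 0 ∧ (k : Int) - t ≤ (j : Int) ∧ (j : Int) ≤ (k : Int) + t) →
    4 ≤ (Y.getD j []).length)
instance (X : List (List Int)) (Y : List (List Int)) (t : Int) : Decidable (Pre_similarity_matching X Y t) := by
  unfold Pre_similarity_matching; infer_instance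

def pvWitness_similarity_matching : List (List Int) × List (List Int) × Int :=
  ([[0, 1, 0, 1], [0, 2, 0, 1]], [[0, 2, 0, 1], [0, 1, 0, 1]], 2)

def Spec_similarity_matching (X : List (List Int)) (Y : List (List Int)) (t : Int) (out : List (Int × Int)) : Prop := out = similarity_matching_alt X Y t
instance (X : List (List Int)) (Y : List (List Int)) (t : Int) (out : List (Int × Int)) : Decidable (Spec_similarity_matching X Y t out) := by unfold Spec_similarity_matching; infer_instance

-- ===== CLAIM (what is proved, stated in full; the proofs are below) =====
def Claim_equal_similarity_matching : Prop := ∀ (X : List (List Int)) (Y : List (List Int)) (t : Int), Dom_similarity_matching X Y t → Pre_similarity_matching X Y t → Spec_similarity_matching X Y t (similarity_matching X Y t)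

-- ===== LEMMAS AND PROOFS =====

-- A's running strict argmin distilled to a single Option accumulator
def pick1 (i : Int) (o : Option Int) (j : Int) : Option Int :=
  match o with
  | none => some j
  | some b => if |i - j| < |i - b| then some j else o

def M1 (i : Int) (acc : Option Int) (L : List Int) : Option Int := L.foldl (pick1 i) acc

-- eligibility as A's inner loop tests it (window bounds come from the range)
def eligA (Y : List (List Int)) (S : PySem.Set Int) (x1 j : Int) : Bool :=
  !(decide (PySem.List.pyGetD (PySem.List.pyGetD Y j []) 3 0 = 0) || PySem.Set.contains S j) &&
  decide (x1 = PySem.List.pyGetD (PySem.List.pyGetD Y j []) 1 0)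

-- "j is at least as good as x" in A's preference order: smaller distance, ties to the left
def LexPref (i j x : Int) : Prop := |i - j| < |i - x| ∨ (|i - j| = |i - x| ∧ j ≤ x)

-- candidates nearestAux can still reach from distance d
def CandB (Y : List (List Int)) (S : PySem.Set Int) (a i lim d j : Int) : Prop :=
  okB Y S a j = true ∧ d ≤ |i - j| ∧ |i - j| ≤ lim

theorem innerA_pair (Y : List (List Int)) (S : PySem.Set Int) (x1 i : Int)
    (acc : Option Int) (j : Int) :
    innerStepA Y S x1 i (acc, acc.map (fun b => |i - b|)) j =
      ((if eligA Y S x1 j then pick1 i acc j else acc),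
       (if eligA Y S x1 j then pick1 i acc j else acc).map (fun b => |i - b|)) := by
  cases acc <;> simp [innerStepA, eligA, pick1] <;> split_ifs <;> simp_all

theorem foldl_innerA_eq_M1 (Y : List (List Int)) (S : PySem.Set Int) (x1 i : Int) :
    ∀ (L : List Int) (acc : Option Int),
      (L.foldl (innerStepA Y S x1 i) (acc, acc.map (fun b => |i - b|))).1 =
        M1 i acc (L.filter (eligA Y S x1)) := by
  intro L
  induction L with
  | nil => intro acc; simp [M1]
  | cons j L ih =>
    intro acc
    rw [List.foldl_cons, innerA_pair]
    by_cases he : eligA Y S x1 j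
    · simp only [he, if_true, List.filter_cons_of_pos he, ih]
      rfl
    · rw [List.filter_cons_of_neg (by simpa using he)]
      simp only [eq_false_of_ne_true he, Bool.false_eq_true, if_neg (fun h => h), ih]

theorem M1_some_ne_none (i : Int) : ∀ (L : List Int) (b : Int), M1 i (some b) L ≠ none := by
  intro L
  induction L with
  | nil => intro b; simp [M1]
  | cons x L ih =>
    intro b
    have h : pick1 i (some b) x = some x ∨ pick1 i (some b) x = some b := by
      by_cases h : |i - x| < |i - b| <;> simp [pick1, h]
    have hM : M1 i (some b) (x :: L) = M1 i (pick1 i (some b) x) L := rfl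
    rcases h with h | h <;> rw [hM, h] <;> exact ih _

theorem M1_some_char (i : Int) : ∀ (L : List Int) (b : Int), L.Pairwise (· < ·) → (∀ x ∈ L, b < x) →
    ∀ j, (M1 i (some b) L = some j ↔
      ((j = b ∨ j ∈ L) ∧ ∀ x, (x = b ∨ x ∈ L) → LexPref i j x)) := by
  intro L
  induction L with
  | nil =>
    intro b _ _ j
    constructor
    · intro h
      have hbj : b = j := by simpa [M1] using h
      subst hbj
      refine ⟨Or.inl rfl, ?_⟩
      rintro x (rfl | hx)
      · exact Or.inr ⟨rfl, le_refl _⟩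
      · simp at hx
    · rintro ⟨(rfl | hj), _⟩
      · simp [M1]
      · simp at hj
  | cons x L ih =>
    intro b hp hb j
    have hbx : b < x := hb x (by simp)
    have hbL : ∀ y ∈ L, b < y := fun y hy => hb y (List.mem_cons_of_mem _ hy)
    have hxL : ∀ y ∈ L, x < y := (List.pairwise_cons.mp hp).1
    have hM : M1 i (some b) (x :: L) = M1 i (pick1 i (some b) x) L := rfl
    by_cases hc : |i - x| < |i - b|
    · have hpick : pick1 i (some b) x = some x := by simp [pick1, hc]
      rw [hM, hpick, ih x (List.pairwise_cons.mp hp).2 hxL j]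
      constructor
      · rintro ⟨hj, hall⟩
        refine ⟨Or.inr (List.mem_cons.mpr hj), ?_⟩
        rintro y (rfl | hy)
        · have h1 := hall x (Or.inl rfl)
          unfold LexPref at h1 ⊢
          simp only [Int.abs_eq_natAbs] at h1 hc ⊢
          omega
        · rcases List.mem_cons.mp hy with rfl | hyL
          · exact hall y (Or.inl rfl)
          · exact hall y (Or.inr hyL)
      · rintro ⟨hj, hall⟩
        have hjb : j ≠ b := by
          rintro rfl
          have h1 := hall x (Or.inr (by simp))
          unfold LexPref at h1
          simp only [Int.abs_eq_natAbs] at h1 hc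
          omega
        refine ⟨?_, ?_⟩
        · rcases hj with rfl | hj
          · exact absurd rfl hjb
          · rcases List.mem_cons.mp hj with rfl | h
            · exact Or.inl rfl
            · exact Or.inr h
        · rintro y (rfl | hy)
          · exact hall y (Or.inr (by simp))
          · exact hall y (Or.inr (List.mem_cons_of_mem _ hy))
    · have hpick : pick1 i (some b) x = some b := by simp [pick1, hc]
      rw [hM, hpick, ih b (List.pairwise_cons.mp hp).2 hbL j]
      constructor
      · rintro ⟨hj, hall⟩
        refine ⟨?_, ?_⟩
        · rcases hj with rfl | h
          · exact Or.inl rfl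
          · exact Or.inr (List.mem_cons_of_mem _ h)
        · rintro y (rfl | hy)
          · exact hall y (Or.inl rfl)
          · rcases List.mem_cons.mp hy with rfl | hyL
            · have h1 := hall b (Or.inl rfl)
              unfold LexPref at h1 ⊢
              simp only [Int.abs_eq_natAbs] at h1 hc ⊢
              omega
            · exact hall y (Or.inr hyL)
      · rintro ⟨hj, hall⟩
        refine ⟨?_, ?_⟩
        · rcases hj with rfl | hj
          · exact Or.inl rfl
          · rcases List.mem_cons.mp hj with rfl | h
            · exfalso
              have h1 := hall b (Or.inl rfl)
              unfold LexPref at h1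
              simp only [Int.abs_eq_natAbs] at h1 hc
              omega
            · exact Or.inr h
        · rintro y (rfl | hy)
          · exact hall y (Or.inl rfl)
          · exact hall y (Or.inr (List.mem_cons_of_mem _ hy))

theorem M1_none_char (i : Int) (L : List Int) (hL : L.Pairwise (· < ·)) (j : Int) :
    M1 i none L = some j ↔ (j ∈ L ∧ ∀ x ∈ L, LexPref i j x) := by
  cases L with
  | nil => simp [M1]
  | cons x L =>
    have hM : M1 i none (x :: L) = M1 i (some x) L := rfl
    rw [hM, M1_some_char i L x (List.pairwise_cons.mp hL).2 (List.pairwise_cons.mp hL).1 j]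
    simp [List.mem_cons]

theorem CandB_ext (Y : List (List Int)) (S : PySem.Set Int) (a i lim d : Int) (hd : 0 ≤ d)
    (h1 : okB Y S a (i - d) = false) (h2 : d = 0 ∨ okB Y S a (i + d) = false) :
    ∀ j, CandB Y S a i lim d j ↔ CandB Y S a i lim (d + 1) j := by
  intro j
  unfold CandB
  constructor
  · rintro ⟨hok, hlo, hhi⟩
    refine ⟨hok, ?_, hhi⟩
    rcases eq_or_lt_of_le hlo with heq | hlt
    · exfalso
      have hj : j = i - d ∨ j = i + d := by
        simp only [Int.abs_eq_natAbs] at heq; omega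
      rcases hj with rfl | rfl
      · rw [hok] at h1; cases h1
      · rcases h2 with rfl | h2
        · rw [show i + (0 : Int) = i - 0 by ring] at hok
          rw [hok] at h1; cases h1
        · rw [hok] at h2; cases h2
    · omega
  · rintro ⟨hok, hlo, hhi⟩
    exact ⟨hok, by omega, hhi⟩

theorem nearestAux_char (Y : List (List Int)) (S : PySem.Set Int) (a i lim : Int) :
    ∀ d : Int, 0 ≤ d →
      ((∀ j, nearestAux Y S a i lim d = some j ↔
          (CandB Y S a i lim d j ∧ ∀ j', CandB Y S a i lim d j' → LexPref i j j')) ∧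
       (nearestAux Y S a i lim d = none ↔ ∀ j, ¬ CandB Y S a i lim d j)) := by
  have H : ∀ (n : Nat) (d : Int), (lim + 1 - d).toNat = n → 0 ≤ d →
      ((∀ j, nearestAux Y S a i lim d = some j ↔
          (CandB Y S a i lim d j ∧ ∀ j', CandB Y S a i lim d j' → LexPref i j j')) ∧
       (nearestAux Y S a i lim d = none ↔ ∀ j, ¬ CandB Y S a i lim d j)) := by
    intro n
    induction n using Nat.strong_induction_on with
    | _ n IH =>
      intro d hn hd
      by_cases hdl : d ≤ lim
      · by_cases hok1 : okB Y S a (i - d) = true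
        · have hres : nearestAux Y S a i lim d = some (i - d) := by
            rw [nearestAux, dif_pos hdl, if_pos hok1]
          have hCand : CandB Y S a i lim d (i - d) := by
            refine ⟨hok1, ?_, ?_⟩ <;> simp only [Int.abs_eq_natAbs] <;> omega
          constructor
          · intro j
            rw [hres]
            constructor
            · intro h
              obtain rfl : i - d = j := Option.some.inj h
              refine ⟨hCand, ?_⟩
              rintro j' ⟨hok', hlo', hhi'⟩
              unfold LexPref
              simp only [Int.abs_eq_natAbs] at *
              omega
            · rintro ⟨⟨hok', hlo', hhi'⟩, hmin⟩
              have hlex := hmin (i - d) hCand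
              unfold LexPref at hlex
              have : j = i - d := by
                simp only [Int.abs_eq_natAbs] at *
                omega
              rw [this]
          · rw [hres]
            constructor
            · intro h; cases h
            · intro hall; exact absurd hCand (hall (i - d))
        · have hok1' : okB Y S a (i - d) = false := by
            cases h : okB Y S a (i - d)
            · rfl
            · exact absurd h hok1
          by_cases hc2 : (decide (d ≠ 0) && okB Y S a (i + d)) = true
          · have hc2ab : decide (d ≠ 0) = true ∧ okB Y S a (i + d) = true := by
              simpa using hc2
            have hd0 : d ≠ 0 := by simpa using hc2ab.1
            have hok2 : okB Y S a (i + d) = true := hc2ab.2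
            have hres : nearestAux Y S a i lim d = some (i + d) := by
              rw [nearestAux, dif_pos hdl, if_neg (by rw [hok1']; exact Bool.false_ne_true), if_pos hc2]
            have hCand : CandB Y S a i lim d (i + d) := by
              refine ⟨hok2, ?_, ?_⟩ <;> simp only [Int.abs_eq_natAbs] <;> omega
            constructor
            · intro j
              rw [hres]
              constructor
              · intro h
                obtain rfl : i + d = j := Option.some.inj h
                refine ⟨hCand, ?_⟩
                rintro j' ⟨hok', hlo', hhi'⟩
                unfold LexPref
                have hne : j' ≠ i - d := by
                  rintro rfl
                  rw [hok'] at hok1'; cases hok1'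
                simp only [Int.abs_eq_natAbs] at *
                omega
              · rintro ⟨⟨hok', hlo', hhi'⟩, hmin⟩
                have hlex := hmin (i + d) hCand
                unfold LexPref at hlex
                have hne : j ≠ i - d := by
                  rintro rfl
                  rw [hok'] at hok1'; cases hok1'
                have : j = i + d := by
                  simp only [Int.abs_eq_natAbs] at *
                  omega
                rw [this]
            · rw [hres]
              constructor
              · intro h; cases h
              · intro hall; exact absurd hCand (hall (i + d))
          · have hc2' : (decide (d ≠ 0) && okB Y S a (i + d)) = false := by
              cases h : (decide (d ≠ 0) && okB Y S a (i + d))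
              · rfl
              · exact absurd h hc2
            have h2 : d = 0 ∨ okB Y S a (i + d) = false := by
              rcases Bool.and_eq_false_iff.mp hc2' with h | h
              · left; simpa using h
              · right; exact h
            have hstep : nearestAux Y S a i lim d = nearestAux Y S a i lim (d + 1) := by
              rw [nearestAux, dif_pos hdl, if_neg (by rw [hok1']; exact Bool.false_ne_true),
                if_neg (by rw [hc2']; exact Bool.false_ne_true)]
            have hext := CandB_ext Y S a i lim d hd hok1' h2
            obtain ⟨IH1, IH2⟩ := IH ((lim + 1 - (d + 1)).toNat) (by omega) (d + 1) rfl (by omega)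
            constructor
            · intro j
              rw [hstep, IH1 j]
              simp only [hext]
            · rw [hstep, IH2]
              simp only [hext]
      · have hres : nearestAux Y S a i lim d = none := by
          rw [nearestAux, dif_neg hdl]
        constructor
        · intro j
          rw [hres]
          constructor
          · intro h; cases h
          · rintro ⟨⟨hok', hlo', hhi'⟩, _⟩
            exfalso
            simp only [Int.abs_eq_natAbs] at *
            omega
        · rw [hres]
          constructor
          · rintro - j ⟨hok', hlo', hhi'⟩
            simp only [Int.abs_eq_natAbs] at *
            omega
          · intro _; rfl
  exact fun d => H ((lim + 1 - d).toNat) d rfl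

theorem eligA_iff (Y : List (List Int)) (S : PySem.Set Int) (a j : Int) :
    eligA Y S a j = true ↔
      (¬ PySem.List.pyGetD (PySem.List.pyGetD Y j []) 3 0 = 0 ∧
       PySem.Set.contains S j = false ∧
       a = PySem.List.pyGetD (PySem.List.pyGetD Y j []) 1 0) := by
  unfold eligA
  simp [and_assoc]

theorem okB_iff (Y : List (List Int)) (S : PySem.Set Int) (a j : Int) :
    okB Y S a j = true ↔
      (0 ≤ j ∧ j < (Y.length : Int) ∧ PySem.Set.contains S j = false ∧
       ¬ PySem.List.pyGetD (PySem.List.pyGetD Y j []) 3 0 = 0 ∧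
       PySem.List.pyGetD (PySem.List.pyGetD Y j []) 1 0 = a) := by
  unfold okB
  simp [and_assoc]

theorem inner_eq (Y : List (List Int)) (S : PySem.Set Int) (a i t : Int) :
    ((PySem.List.pyRange (max 0 (i - t)) (min (Y.length : Int) (i + t + 1)) 1).foldl
        (innerStepA Y S a i) (none, none)).1 = nearestB Y S a i t := by
  have h1 := foldl_innerA_eq_M1 Y S a i
      (PySem.List.pyRange (max 0 (i - t)) (min (Y.length : Int) (i + t + 1)) 1) none
  simp only [Option.map_none] at h1
  rw [h1]
  set L := (PySem.List.pyRange (max 0 (i - t)) (min (Y.length : Int) (i + t + 1)) 1).filter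
      (eligA Y S a) with hLdef
  have hpair : L.Pairwise (· < ·) :=
    (PySem.List.pairwise_lt_pyRange_one (max 0 (i - t)) (min (Y.length : Int) (i + t + 1))).sublist
      List.filter_sublist
  have hmem : ∀ j, j ∈ L ↔ CandB Y S a i (min t (max i ((Y.length : Int) - 1 - i))) 0 j := by
    intro j
    rw [hLdef, List.mem_filter, PySem.List.mem_pyRange_one, eligA_iff]
    unfold CandB
    rw [okB_iff]
    constructor
    · rintro ⟨⟨hjlo, hjhi⟩, h3, hcont, h1a⟩
      refine ⟨⟨by omega, by omega, hcont, h3, h1a.symm⟩, ?_, ?_⟩ <;>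
        simp only [Int.abs_eq_natAbs] <;> omega
    · rintro ⟨⟨hj0, hjn, hcont, h3, h1a⟩, -, hhi⟩
      simp only [Int.abs_eq_natAbs] at hhi
      exact ⟨⟨by omega, by omega⟩, h3, hcont, h1a.symm⟩
  obtain ⟨hsome, hnone⟩ := nearestAux_char Y S a i (min t (max i ((Y.length : Int) - 1 - i))) 0 le_rfl
  unfold nearestB
  rcases hA : M1 i none L with _ | j <;>
    rcases hB : nearestAux Y S a i (min t (max i ((Y.length : Int) - 1 - i))) 0 with _ | j'
  · rfl
  · exfalso
    have hLnil : L = [] := by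
      cases hc : L with
      | nil => rfl
      | cons x L' =>
        exfalso
        have : M1 i none (x :: L') = M1 i (some x) L' := rfl
        rw [hc, this] at hA
        exact M1_some_ne_none i L' x hA
    obtain ⟨hC, -⟩ := (hsome j').mp hB
    have := (hmem j').mpr hC
    rw [hLnil] at this
    simp at this
  · exfalso
    obtain ⟨hjL, -⟩ := (M1_none_char i L hpair j).mp hA
    exact (hnone.mp hB) j ((hmem j).mp hjL)
  · obtain ⟨hjL, hminA⟩ := (M1_none_char i L hpair j).mp hA
    obtain ⟨hC', hminB⟩ := (hsome j').mp hB
    have hCj := (hmem j).mp hjL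
    have hj'L := (hmem j').mpr hC'
    have l1 := hminA j' hj'L
    have l2 := hminB j hCj
    have : j = j' := by
      unfold LexPref at l1 l2
      simp only [Int.abs_eq_natAbs] at l1 l2
      omega
    rw [this]

theorem step_eq (Y : List (List Int)) (t : Int) (st : List (Int × Int) × PySem.Set Int)
    (ix : Int × List Int) : stepA Y t st ix = stepB Y t st ix := by
  unfold stepA stepB
  by_cases h3 : PySem.List.pyGetD ix.2 3 0 = 0
  · simp [h3]
  · simp only [h3, ne_eq, not_false_iff, if_true, if_false]
    rw [inner_eq Y st.2 (PySem.List.pyGetD ix.2 1 0) ix.1 t]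

-- ===== VERDICT (by name: the statement is the Claim_ definition above) =====
theorem similarity_matching_spec : Claim_equal_similarity_matching := by
  intro X Y t _ _
  unfold Spec_similarity_matching similarity_matching similarity_matching_alt
  have h : stepA Y t = stepB Y t := funext fun st => funext fun ix => step_eq Y t st ix
  rw [h]
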